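-- pv_equiv track=rewrite | github.com/bfly/aoc2020 | python/day24.py | part1
-- ===== SOURCE A (Python) =====
-- from typing import Set, Tuple
--
-- def part1(_lines):
--     black_tiles: Set[Tuple[int, int]] = set()
--
--     for line in _lines.strip().splitlines():
--         x = y = i = 0
--         while i < len(line):
--             if line.startswith('e', i):
--                 x += 2
--                 i += 1
--             elif line.startswith('w', i):
--                 x += -2
--                 i += 1
--             elif line.startswith('ne', i):
--                 x += 1
--                 y += 2
--                 i += 2
--             elif line.startswith('nw', i):
--                 x += -1
--                 y += 2
--                 i += 2
--             elif line.startswith('se', i):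
--                 x += 1
--                 y += -2
--                 i += 2
--             elif line.startswith('sw', i):
--                 x += -1
--                 y += -2
--                 i += 2
--             else:
--                 raise AssertionError(line[i:])
--
--         black_tiles ^= {(x, y)}
--
--     return len(black_tiles)
-- ===== SOURCE B (Python) =====
-- def part1(_lines):
--     counts = {}
--     for line in _lines.strip().splitlines():
--         x = y = 0
--         pending = None  # 'n' or 's' waiting for its e/w
--         for ch in line:
--             if pending is not None:
--                 if ch == 'e':
--                     x += 1
--                 elif ch == 'w':
--                     x -= 1
--                 else:
--                     raise AssertionError(pending + ch)
--                 y += 2 if pending == 'n' else -2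
--                 pending = None
--             elif ch == 'e':
--                 x += 2
--             elif ch == 'w':
--                 x -= 2
--             elif ch == 'n' or ch == 's':
--                 pending = ch
--             else:
--                 raise AssertionError(ch)
--         if pending is not None:
--             raise AssertionError(pending)
--         counts[(x, y)] = counts.get((x, y), 0) + 1
--     return sum(1 for v in counts.values() if v % 2)
-- ===== Notes on version B (the rewrite author's own statement) =====
-- stated objective: alternative
-- what changed: B replaces A's index+startswith token scan with a one-character state machine (a pending 'n'/'s' awaiting its 'e'/'w'), and replaces the live set toggled by symmetric difference with a count dictionary plus a separate final pass counting coordinates with odd count.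
import Mathlib
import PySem

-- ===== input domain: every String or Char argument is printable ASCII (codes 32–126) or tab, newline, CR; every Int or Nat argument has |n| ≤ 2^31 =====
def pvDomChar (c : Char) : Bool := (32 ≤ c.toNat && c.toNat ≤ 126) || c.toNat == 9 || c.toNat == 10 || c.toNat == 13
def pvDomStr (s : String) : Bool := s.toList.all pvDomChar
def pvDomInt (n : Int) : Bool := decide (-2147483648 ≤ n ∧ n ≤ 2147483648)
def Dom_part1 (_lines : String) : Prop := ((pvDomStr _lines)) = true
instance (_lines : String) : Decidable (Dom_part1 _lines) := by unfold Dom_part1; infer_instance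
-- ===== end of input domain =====

-- B parses each line with a one-character pending-n/s state machine and counts line endpoints
-- in a dictionary, returning the number of coordinates with odd count, instead of A's
-- index/startswith scan toggling a live set by symmetric difference (objective: alternative).


-- ===== PORT A =====
-- A's while loop over one line: the startswith checks in A's order; none = AssertionError.
def p1Loop : List Char → Int → Int → Option (Int × Int)
  | [], x, y => some (x, y)
  | 'e' :: r, x, y => p1Loop r (x + 2) y
  | 'w' :: r, x, y => p1Loop r (x + -2) y
  | 'n' :: 'e' :: r, x, y => p1Loop r (x + 1) (y + 2)
  | 'n' :: 'w' :: r, x, y => p1Loop r (x + -1) (y + 2)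
  | 's' :: 'e' :: r, x, y => p1Loop r (x + 1) (y + -2)
  | 's' :: 'w' :: r, x, y => p1Loop r (x + -1) (y + -2)
  | _, _, _ => none

-- one iteration of A's outer for-loop (none once a line has raised)
def stepA (acc : Option (PySem.Set (Int × Int))) (line : String) :
    Option (PySem.Set (Int × Int)) :=
  match acc with
  | none => none
  | some black_tiles =>
    match p1Loop line.toList 0 0 with
    | none => none
    | some xy => some (PySem.Set.symmDiff black_tiles (PySem.Set.ofList [xy]))

def part1 (_lines : String) : Int :=
  let st := (PySem.Str.splitlines (PySem.Str.strip _lines)).foldl stepA (some PySem.Set.empty)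
  match st with
  | none => 0          -- A raises AssertionError here (outside Pre_part1)
  | some black_tiles => (PySem.Set.len black_tiles : Int)

-- ===== PORT B =====
-- B's for-loop over one line's characters: 'pending' holds an unconsumed 'n'/'s'; none = AssertionError.
def p2Line : List Char → Int → Int → Option Char → Option (Int × Int)
  | [], x, y, none => some (x, y)
  | [], _, _, some _ => none
  | c :: r, x, y, some pending =>
      if c = 'e' then p2Line r (x + 1) (y + (if pending = 'n' then 2 else -2)) none
      else if c = 'w' then p2Line r (x - 1) (y + (if pending = 'n' then 2 else -2)) none
      else none
  | c :: r, x, y, none =>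
      if c = 'e' then p2Line r (x + 2) y none
      else if c = 'w' then p2Line r (x - 2) y none
      else if c = 'n' ∨ c = 's' then p2Line r x y (some c)
      else none

-- one iteration of B's outer for-loop (none once a line has raised)
def stepB (acc : Option (PySem.Dict (Int × Int) Int)) (line : String) :
    Option (PySem.Dict (Int × Int) Int) :=
  match acc with
  | none => none
  | some counts =>
    match p2Line line.toList 0 0 none with
    | none => none
    | some xy => some (counts.insert xy (counts.getD xy 0 + 1))

def part1_alt (_lines : String) : Int :=
  let st := (PySem.Str.splitlines (PySem.Str.strip _lines)).foldl stepB (some PySem.Dict.empty)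
  match st with
  | none => 0          -- B raises AssertionError here (outside Pre_part1)
  | some counts =>
      ((counts.values.filter (fun v => PySem.Int.mod v 2 ≠ 0)).length : Int)

-- ===== PRECONDITION & SPEC =====
-- Pre_ excludes exactly the inputs on which the Python A (and B) raise AssertionError:
-- some line is not a concatenation of the six direction tokens e, w, ne, nw, se, sw.
-- lineOk is regular-language membership for that token alphabet (shape only, no state).
def lineOk : List Char → Bool
  | [] => true
  | 'e' :: r => lineOk r
  | 'w' :: r => lineOk r
  | 'n' :: 'e' :: r => lineOk r
  | 'n' :: 'w' :: r => lineOk r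
  | 's' :: 'e' :: r => lineOk r
  | 's' :: 'w' :: r => lineOk r
  | _ => false

def Pre_part1 (_lines : String) : Prop :=
  (PySem.Str.splitlines (PySem.Str.strip _lines)).all (fun l => lineOk l.toList) = true
instance (_lines : String) : Decidable (Pre_part1 _lines) := by unfold Pre_part1; infer_instance

def pvWitness_part1 : String := "esenee\nsw\n\nnwwswee"

def Spec_part1 (_lines : String) (out : Int) : Prop := out = part1_alt _lines
instance (_lines : String) (out : Int) : Decidable (Spec_part1 _lines out) := by unfold Spec_part1; infer_instance

-- ===== CLAIM (what is proved, stated in full; the proofs are below) =====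
def Claim_equal_part1 : Prop := ∀ (_lines : String), Dom_part1 _lines → Pre_part1 _lines → Spec_part1 _lines (part1 _lines)

-- ===== LEMMAS AND PROOFS =====

-- The two line parsers agree everywhere (B's pending state machine takes A's two-char tokens in two steps).
theorem loop_eq (cs : List Char) : ∀ x y, p1Loop cs x y = p2Line cs x y none := by
  fun_induction p1Loop cs 0 0 <;> intro x y <;> simp_all [p1Loop, p2Line, sub_eq_add_neg]
  rename_i t _ _ hnil he hw hne hnw hse hsw
  cases t with
  | nil => exact absurd rfl hnil
  | cons c r =>
    have hce : c ≠ 'e' := fun h => he r (by rw [h])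
    have hcw : c ≠ 'w' := fun h => hw r (by rw [h])
    by_cases hns : c = 'n' ∨ c = 's'
    · simp only [p2Line]
      rw [if_neg hce, if_neg hcw, if_pos hns]
      cases r with
      | nil => simp [p2Line]
      | cons c2 r2 =>
        have h2e : c2 ≠ 'e' := by
          rintro rfl; rcases hns with rfl | rfl
          exacts [hne _ rfl, hse _ rfl]
        have h2w : c2 ≠ 'w' := by
          rintro rfl; rcases hns with rfl | rfl
          exacts [hnw _ rfl, hsw _ rfl]
        simp only [p2Line]
        rw [if_neg h2e, if_neg h2w]
    · simp only [p2Line]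
      rw [if_neg hce, if_neg hcw, if_neg hns]

-- parse of all lines, the shared skeleton of both folds
def parseAll : List String → Option (List (Int × Int))
  | [] => some []
  | l :: r =>
    match p1Loop l.toList 0 0 with
    | none => none
    | some k => (parseAll r).map (k :: ·)

theorem stepA_none (lines : List String) : List.foldl stepA none lines = none := by
  induction lines with
  | nil => rfl
  | cons l r ih => simpa [stepA] using ih

theorem stepB_none (lines : List String) : List.foldl stepB none lines = none := by
  induction lines with
  | nil => rfl
  | cons l r ih => simpa [stepB] using ih

theorem foldA_eq (lines : List String) : ∀ (s : PySem.Set (Int × Int)),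
    List.foldl stepA (some s) lines =
      (parseAll lines).map
        (fun ks => List.foldl (fun t k => PySem.Set.symmDiff t (PySem.Set.ofList [k])) s ks) := by
  induction lines with
  | nil => intro s; simp [parseAll]
  | cons l r ih =>
    intro s
    simp only [List.foldl_cons, parseAll, stepA]
    cases h : p1Loop l.toList 0 0 with
    | none => simp [stepA_none]
    | some k =>
      rw [ih]
      cases parseAll r <;> simp

theorem foldB_eq (lines : List String) : ∀ (d : PySem.Dict (Int × Int) Int),
    List.foldl stepB (some d) lines =
      (parseAll lines).map
        (fun ks => List.foldl (fun d k => d.insert k (d.getD k 0 + 1)) d ks) := by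
  induction lines with
  | nil => intro d; simp [parseAll]
  | cons l r ih =>
    intro d
    simp only [List.foldl_cons, parseAll, stepB]
    rw [← loop_eq]
    cases h : p1Loop l.toList 0 0 with
    | none => simp [stepB_none]
    | some k =>
      rw [ih]
      cases parseAll r <;> simp

-- the toggle fold keeps a duplicate-free list whose members are exactly the odd-count keys
theorem foldA_inv (ks : List (Int × Int)) : ∀ (s : PySem.Set (Int × Int)), s.Nodup →
    (List.foldl (fun t k => PySem.Set.symmDiff t (PySem.Set.ofList [k])) s ks).Nodup ∧
    ∀ x, x ∈ List.foldl (fun t k => PySem.Set.symmDiff t (PySem.Set.ofList [k])) s ks ↔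
      ((x ∈ s ∧ ks.count x % 2 = 0) ∨ (x ∉ s ∧ ks.count x % 2 = 1)) := by
  induction ks with
  | nil =>
    intro s hs
    refine ⟨hs, fun x => ?_⟩
    simp
  | cons k r ih =>
    intro s hs
    have hnd : (PySem.Set.symmDiff s (PySem.Set.ofList [k])).Nodup :=
      PySem.Set.nodup_symmDiff _ _ hs (PySem.Set.nodup_ofList _)
    obtain ⟨h1, h2⟩ := ih _ hnd
    refine ⟨h1, fun x => ?_⟩
    rw [List.foldl_cons, h2 x]
    have hm : x ∈ PySem.Set.symmDiff s (PySem.Set.ofList [k]) ↔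
        ((x ∈ s ∧ x ≠ k) ∨ (x = k ∧ x ∉ s)) := by
      rw [PySem.Set.mem_symmDiff]
      simp [PySem.Set.mem_ofList]
    rw [List.count_cons, hm]
    have hcount : (if (k == x) = true then 1 else 0) = (if x = k then 1 else 0) := by
      by_cases h : x = k
      · subst h; simp
      · simp [h]
        exact fun hh => h hh.symm
    rw [hcount]
    by_cases hxk : x = k
    · subst hxk
      by_cases hxs : x ∈ s <;> simp [hxs] <;> omega
    · by_cases hxs : x ∈ s <;> simp [hxk, hxs]

theorem part1_spec : Claim_equal_part1 := by
  intro lines _ _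
  show part1 lines = part1_alt lines
  unfold part1 part1_alt
  rw [foldA_eq, foldB_eq]
  cases hp : parseAll (PySem.Str.splitlines (PySem.Str.strip lines)) with
  | none => simp
  | some ks =>
    simp only [Option.map_some]
    obtain ⟨hnd, hmem⟩ := foldA_inv ks (PySem.Set.empty) List.nodup_nil
    have hB : ((List.foldl (fun d k => d.insert k (d.getD k 0 + 1)) PySem.Dict.empty ks).values.filter
          (fun v => PySem.Int.mod v 2 ≠ 0)) =
        ((PySem.Set.ofList ks).filter (fun k => PySem.Int.mod (ks.count k : Int) 2 ≠ 0)).map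
          (fun k => (ks.count k : Int)) := by
      rw [PySem.Dict.foldl_insert_getD_add_one_eq_counter]
      show ((PySem.Dict.counter ks).items.map Prod.snd).filter _ = _
      rw [PySem.Dict.items_counter, List.map_map, List.filter_map]
      rfl
    have hq : ∀ (c : Nat), (decide (PySem.Int.mod (c : Int) 2 ≠ 0) = true) ↔ c % 2 = 1 := by
      intro c
      rw [decide_eq_true_eq, PySem.Int.mod_eq_emod_of_pos (by norm_num)]
      omega
    have hperm : (List.foldl (fun t k => PySem.Set.symmDiff t (PySem.Set.ofList [k]))
          PySem.Set.empty ks).Perm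
        ((PySem.Set.ofList ks).filter (fun k => PySem.Int.mod (ks.count k : Int) 2 ≠ 0)) := by
      refine (List.perm_ext_iff_of_nodup hnd ((PySem.Set.nodup_ofList ks).filter _)).mpr fun a => ?_
      have hc := hmem a
      have hemp : ∀ b : Int × Int, (b ∈ (PySem.Set.empty : PySem.Set (Int × Int))) ↔ False := by
        simp [PySem.Set.empty]
      simp only [hemp, false_and, not_false_iff, true_and, false_or] at hc
      rw [hc, List.mem_filter, PySem.Set.mem_ofList, hq]
      constructor
      · intro h
        exact ⟨List.count_pos_iff.mp (by omega), h⟩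
      · rintro ⟨-, h⟩
        exact h
    show (PySem.Set.len _ : Int) = _
    rw [hB, List.length_map]
    show ((List.foldl _ PySem.Set.empty ks).length : Int) = _
    rw [hperm.length_eq]
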